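-- pv_equiv track=rewrite | github.com/artdiev/exoclick-test | task1-3.py | highest_occurrence
-- ===== SOURCE A (Python) =====
-- def highest_occurrence(array):
--     """
--     Time: O(n)
--     Space: O(n)
--     :param array: strings, int or floats, can be mixed
--     :return: array containing element(s) with the highest
--     occurrences without type coercion.
--     Returns an empty array if given array is empty.
--     """
--     # hash table with a count of each item in the array
--     counted = {}
--     for item in array:
--         if item in counted.keys():
--             counted[item] += 1
--         else:
--             counted[item] = 1
--
--     frequencies = counted.values()
--     highest_frequency = max(frequencies, default="")
--     most_frequent = [item for item in counted if counted[item] == highest_frequency]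
--     return most_frequent
-- ===== SOURCE B (Python) =====
-- def highest_occurrence(array):
--     best = 0
--     result = []
--     for i, v in enumerate(array):
--         if v in array[:i]:
--             continue  # not the first occurrence of v
--         c = array.count(v)
--         if c > best:
--             best = c
--             result = [v]
--         elif c == best:
--             result.append(v)
--     return result
-- ===== Notes on version B (the rewrite author's own statement) =====
-- stated objective: alternative
-- what changed: B drops the hash-count-then-max-then-filter pipeline entirely: it makes one pass over the array, skipping non-first occurrences via a prefix membership test, counting each new element directly with array.count, and maintaining a running maximum together with the tie list (reset on a new maximum, append on a tie).
import Mathlib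
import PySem

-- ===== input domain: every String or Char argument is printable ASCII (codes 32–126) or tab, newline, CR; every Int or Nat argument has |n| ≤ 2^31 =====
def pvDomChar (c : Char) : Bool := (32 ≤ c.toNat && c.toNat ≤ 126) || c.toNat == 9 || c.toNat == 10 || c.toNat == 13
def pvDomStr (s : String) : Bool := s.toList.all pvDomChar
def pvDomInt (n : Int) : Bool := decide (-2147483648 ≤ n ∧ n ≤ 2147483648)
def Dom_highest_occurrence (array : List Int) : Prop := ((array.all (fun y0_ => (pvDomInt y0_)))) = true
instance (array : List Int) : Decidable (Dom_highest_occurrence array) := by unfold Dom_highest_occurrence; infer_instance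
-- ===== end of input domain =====

-- B is dict-free: one pass that skips non-first occurrences, counts each new element
-- with array.count, and keeps a running maximum with its tie list (alternative
-- decomposition; B is O(n^2) where A is O(n)).

-- ===== PORT A =====
-- max(frequencies, default="") : the "" default is only reached when counted is empty, where
-- the final comprehension yields [] regardless; it is ported as the `none` branch of max?.
def highest_occurrence (array : List Int) : List Int :=
  let counted := array.foldl
    (fun d item => if d.contains item then d.modify item 0 (· + 1) else d.insert item 1)
    (PySem.Dict.empty : PySem.Dict Int Int)
  let frequencies := counted.values
  match PySem.List.max? frequencies id with
  | none => []
  | some highest => counted.keys.filter (fun item => counted.getD item 0 == highest)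

-- ===== PORT B =====
def highest_occurrence_alt (array : List Int) : List Int :=
  ((PySem.List.enumerate array).foldl
    (fun (st : Int × List Int) p =>
      if (PySem.List.slice array (some 0) (some p.1)).contains p.2 then st
      else
        let c : Int := (PySem.List.count array p.2 : Int)
        if c > st.1 then (c, [p.2])
        else if c == st.1 then (st.1, st.2 ++ [p.2])
        else st)
    ((0 : Int), ([] : List Int))).2

-- ===== PRECONDITION & SPEC =====
def Spec_highest_occurrence (array : List Int) (out : List Int) : Prop := out = highest_occurrence_alt array
instance (array : List Int) (out : List Int) : Decidable (Spec_highest_occurrence array out) := by unfold Spec_highest_occurrence; infer_instance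

-- ===== CLAIM (what is proved, stated in full; the proofs are below) =====
def Claim_equal_highest_occurrence : Prop := ∀ (array : List Int), Dom_highest_occurrence array → Spec_highest_occurrence array (highest_occurrence array)

-- ===== LEMMAS AND PROOFS =====

-- A's counting loop builds collections.Counter(array): the `contains` branch split is
-- exactly `modify item 0 (· + 1)` in both cases.
lemma countA_eq_counter (array : List Int) :
    array.foldl
      (fun d item => if d.contains item then d.modify item 0 (· + 1) else d.insert item 1)
      (PySem.Dict.empty : PySem.Dict Int Int)
    = PySem.Dict.counter array := by
  rw [PySem.Dict.counter_eq_foldl]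
  congr 1
  funext d item
  split_ifs with h
  · rfl
  · have h' : d.contains item = false := by simpa using h
    simp [PySem.Dict.modify, PySem.Dict.getD_of_not_contains, h']

-- B's running maximum over the distinct elements seen so far
def bBest (array S : List Int) : Int :=
  S.foldl (fun a u => max a ((array.count u : Int))) 0

-- B's loop invariant: after consuming the prefix `pre`, the state is
-- (bBest over the distinct elements of pre, those of them realising it, in order).
lemma bLoop_spec (array : List Int) (suf pre : List Int) (h : array = pre ++ suf) :
    (PySem.List.enumerate suf ((pre.length : Int))).foldl
      (fun (st : Int × List Int) p =>
        if (PySem.List.slice array (some 0) (some p.1)).contains p.2 then st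
        else
          let c : Int := (PySem.List.count array p.2 : Int)
          if c > st.1 then (c, [p.2])
          else if c == st.1 then (st.1, st.2 ++ [p.2])
          else st)
      (bBest array (PySem.Set.ofList pre),
        (PySem.Set.ofList pre).filter
          (fun u => (array.count u : Int) == bBest array (PySem.Set.ofList pre)))
    = (bBest array (PySem.Set.ofList array),
        (PySem.Set.ofList array).filter
          (fun u => (array.count u : Int) == bBest array (PySem.Set.ofList array))) := by
  induction suf generalizing pre with
  | nil => simp [PySem.List.enumerate, h]
  | cons v suf ih =>
      rw [PySem.List.enumerate_cons, List.foldl_cons]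
      have hslice : PySem.List.slice array (some 0) (some ((pre.length : Nat) : Int)) = pre := by
        rw [PySem.List.slice_zero_start, PySem.List.slice_to_natCast, h, List.take_left]
      have hofl : PySem.Set.ofList (pre ++ [v]) = PySem.Set.add (PySem.Set.ofList pre) v := by
        simp [PySem.Set.ofList_eq_foldl]
      have hpre' : array = (pre ++ [v]) ++ suf := by simp [h]
      have hlen : ((pre ++ [v]).length : Int) = (pre.length : Int) + 1 := by
        simp
      by_cases hv : v ∈ pre
      · -- not a first occurrence: state unchanged, distinct set unchanged
        have hc : (PySem.List.slice array (some 0) (some ((pre.length : Int)))).contains v = true := by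
          rw [hslice]; simpa using hv
        rw [if_pos hc]
        have hset : PySem.Set.add (PySem.Set.ofList pre) v = PySem.Set.ofList pre := by
          unfold PySem.Set.add
          rw [if_pos (by simpa [PySem.Set.contains, PySem.Set.mem_ofList] using hv)]
        have := ih (pre ++ [v]) hpre'
        rw [hofl, hset, hlen] at this
        simpa using this
      · -- first occurrence of v
        have hc : (PySem.List.slice array (some 0) (some ((pre.length : Int)))).contains v = false := by
          rw [hslice]; simpa using hv
        rw [if_neg (by rw [hc]; simp)]
        have hset : PySem.Set.add (PySem.Set.ofList pre) v = PySem.Set.ofList pre ++ [v] := by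
          unfold PySem.Set.add
          rw [if_neg (by simpa [PySem.Set.contains, PySem.Set.mem_ofList] using hv)]
        have hbest' : bBest array (PySem.Set.ofList (pre ++ [v]))
            = max (bBest array (PySem.Set.ofList pre)) ((array.count v : Int)) := by
          rw [hofl, hset]; unfold bBest; rw [List.foldl_append]; simp
        have hub : ∀ u ∈ PySem.Set.ofList pre,
            (array.count u : Int) ≤ bBest array (PySem.Set.ofList pre) :=
          (PySem.List.le_foldl_max_int (PySem.Set.ofList pre)
            (fun u => ((array.count u : Int))) 0).2
        have hcv1 : (1 : Int) ≤ (array.count v : Int) := by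
          have : v ∈ array := by rw [h]; simp
          exact_mod_cast List.count_pos_iff.2 this
        set B := bBest array (PySem.Set.ofList pre) with hB
        have main : ∀ st₁ : Int × List Int,
            st₁ = (if (array.count v : Int) > B then ((array.count v : Int), [v])
              else if (array.count v : Int) == B then (B, (PySem.Set.ofList pre).filter
                  (fun u => (array.count u : Int) == B) ++ [v])
              else (B, (PySem.Set.ofList pre).filter (fun u => (array.count u : Int) == B))) →
            st₁ = (bBest array (PySem.Set.ofList (pre ++ [v])),
              (PySem.Set.ofList (pre ++ [v])).filter
                (fun u => (array.count u : Int) == bBest array (PySem.Set.ofList (pre ++ [v])))) := by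
          intro st₁ hst
          rw [hst, hbest', hofl, hset]
          by_cases hgt : (array.count v : Int) > B
          · rw [if_pos hgt, max_eq_right (le_of_lt hgt)]
            rw [List.filter_append]
            have : (PySem.Set.ofList pre).filter
                (fun u => (array.count u : Int) == ((array.count v : Int))) = [] := by
              rw [List.filter_eq_nil_iff]
              intro u hu
              have := hub u hu
              simp only [beq_iff_eq]
              omega
            simp [this]
          · rw [if_neg hgt]
            have hle : (array.count v : Int) ≤ B := not_lt.1 hgt
            rw [max_eq_left hle, List.filter_append]
            by_cases heq : (array.count v : Int) = B
            · rw [if_pos (by simpa using heq)]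
              simp [heq]
            · rw [if_neg (by simpa using heq)]
              simp [heq]
        have step := main _ rfl
        -- apply the inductive hypothesis from the extended prefix
        have ihv := ih (pre ++ [v]) hpre'
        rw [hlen] at ihv
        by_cases hgt : (array.count v : Int) > B
        · rw [if_pos (by exact_mod_cast hgt)]
          rw [if_pos hgt] at step
          rw [show ((PySem.List.count array v : Int), [v])
              = (bBest array (PySem.Set.ofList (pre ++ [v])),
                (PySem.Set.ofList (pre ++ [v])).filter
                  (fun u => (array.count u : Int) == bBest array (PySem.Set.ofList (pre ++ [v])))) from step]
          exact ihv
        · rw [if_neg (by exact_mod_cast hgt)]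
          rw [if_neg hgt] at step
          by_cases heq : (array.count v : Int) = B
          · rw [if_pos (by simpa [PySem.List.count] using heq)]
            rw [if_pos (by simpa using heq)] at step
            rw [show (B, (PySem.Set.ofList pre).filter (fun u => (array.count u : Int) == B) ++ [v])
                = (bBest array (PySem.Set.ofList (pre ++ [v])),
                  (PySem.Set.ofList (pre ++ [v])).filter
                    (fun u => (array.count u : Int) == bBest array (PySem.Set.ofList (pre ++ [v])))) from step]
            exact ihv
          · rw [if_neg (by simpa [PySem.List.count] using heq)]
            rw [if_neg (by simpa using heq)] at step
            rw [show (B, (PySem.Set.ofList pre).filter (fun u => (array.count u : Int) == B))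
                = (bBest array (PySem.Set.ofList (pre ++ [v])),
                  (PySem.Set.ofList (pre ++ [v])).filter
                    (fun u => (array.count u : Int) == bBest array (PySem.Set.ofList (pre ++ [v])))) from step]
            exact ihv

-- on a nonempty array, max of the counter's values is B's running maximum seeded with 0
lemma maxA_eq_bBest (x : Int) (xs : List Int) :
    PySem.List.max? (PySem.Dict.counter (x :: xs)).values id
      = some (bBest (x :: xs) (PySem.Set.ofList (x :: xs))) := by
  have hvals : (PySem.Dict.counter (x :: xs)).values
      = (PySem.Set.ofList (x :: xs)).map (fun k => (((x :: xs).count k : Int))) := by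
    have := PySem.Dict.items_counter (x :: xs)
    simp only [PySem.Dict.values, this, List.map_map]
    rfl
  rw [hvals]
  have hx : x ∈ PySem.Set.ofList (x :: xs) := (PySem.Set.mem_ofList _ _).2 List.mem_cons_self
  obtain ⟨k, S', hS⟩ : ∃ k S', PySem.Set.ofList (x :: xs) = k :: S' := by
    cases hSS : PySem.Set.ofList (x :: xs) with
    | nil => rw [hSS] at hx; cases hx
    | cons k S' => exact ⟨k, S', rfl⟩
  have hk1 : (1 : Int) ≤ ((x :: xs).count k : Int) := by
    have hkmem : k ∈ (x :: xs) := by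
      have : k ∈ PySem.Set.ofList (x :: xs) := by rw [hS]; exact List.mem_cons_self
      exact (PySem.Set.mem_ofList _ _).1 this
    exact_mod_cast List.count_pos_iff.2 hkmem
  rw [hS, List.map_cons, show (id : Int → Int) = (fun y => y) from rfl, PySem.List.max?_id_cons]
  unfold bBest
  congr 1
  rw [List.foldl_map, List.foldl_cons,
    max_eq_right (by omega : (0 : Int) ≤ (((x :: xs).count k : Int)))]

lemma highest_occurrence_eq_alt (array : List Int) :
    highest_occurrence array = highest_occurrence_alt array := by
  cases array with
  | nil => decide
  | cons x xs =>
      have hB := bLoop_spec (x :: xs) (x :: xs) [] rfl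
      simp only [List.length_nil, Nat.cast_zero, bBest] at hB
      have h0 : PySem.Set.ofList ([] : List Int) = [] := rfl
      rw [h0, List.foldl_nil, List.filter_nil] at hB
      have hAlt : highest_occurrence_alt (x :: xs)
          = (PySem.Set.ofList (x :: xs)).filter
              (fun u => (((x :: xs).count u : Int)) == bBest (x :: xs) (PySem.Set.ofList (x :: xs))) := by
        simp only [highest_occurrence_alt]
        rw [hB]
        rfl
      rw [hAlt]
      simp only [highest_occurrence, countA_eq_counter]
      cases hmax : PySem.List.max? (PySem.Dict.counter (x :: xs)).values id with
      | none => rw [maxA_eq_bBest] at hmax; cases hmax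
      | some M =>
          rw [maxA_eq_bBest] at hmax
          injection hmax with hM
          rw [PySem.Dict.keys_counter]
          show List.filter (fun item => (PySem.Dict.counter (x :: xs)).getD item 0 == M)
              (PySem.Set.ofList (x :: xs))
            = List.filter
              (fun u => (((x :: xs).count u : Int)) == bBest (x :: xs) (PySem.Set.ofList (x :: xs)))
              (PySem.Set.ofList (x :: xs))
          congr 1
          funext u
          rw [PySem.Dict.getD_counter, hM]

-- ===== VERDICT (by name: the statement is the Claim_ definition above) =====
theorem highest_occurrence_spec : Claim_equal_highest_occurrence := by
  intro array _
  exact highest_occurrence_eq_alt array
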